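-- pv_equiv track=rewrite | github.com/dubsidiya/checkbrain | desh/ege2026kp/25solve/25-298.py | matchMask
-- ===== SOURCE A (Python) =====
-- def matchMask( s ):
--   if not (s.startswith('123') and s.endswith('67') ):
--     return False
--   s = s[3:-2]
--   if '45' not in s: return False
--   pos = s.index('45')
--   return all( c in '02468' for c in s[:pos] ) and \
--          len(s[pos+2:]) == 1
-- ===== SOURCE B (Python) =====
-- def matchMask(s):
--     # Validate by fixed-width slices anchored at both ends: '123' + even digits + '45' + any one char + '67'.
--     n = len(s)
--     return (n >= 8 and s[:3] == '123' and s[n-5:n-3] == '45'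
--             and s[n-2:] == '67'
--             and all(c in '02468' for c in s[3:n-5]))
-- ===== Notes on version B (the rewrite author's own statement) =====
-- stated objective: simpler
-- what changed: B validates the mask with fixed-width slices anchored at both ends of the string (3-char prefix, 5-char suffix of marker digits + one wildcard char, all-even-digit middle), replacing A's trim-then-substring-search for the first marker occurrence; no search is needed because the even-digit run cannot contain the marker.
import Mathlib
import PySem

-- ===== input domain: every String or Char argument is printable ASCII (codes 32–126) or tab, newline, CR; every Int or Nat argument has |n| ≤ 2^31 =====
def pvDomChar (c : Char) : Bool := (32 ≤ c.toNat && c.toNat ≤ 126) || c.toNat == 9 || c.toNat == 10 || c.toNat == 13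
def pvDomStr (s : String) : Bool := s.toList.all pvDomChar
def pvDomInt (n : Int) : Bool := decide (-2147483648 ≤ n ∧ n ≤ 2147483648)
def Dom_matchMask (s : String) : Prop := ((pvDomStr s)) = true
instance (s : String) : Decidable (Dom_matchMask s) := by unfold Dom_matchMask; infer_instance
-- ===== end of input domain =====

set_option maxHeartbeats 1000000


-- B validates the mask with fixed-width slices anchored at both ends of the string
-- instead of A's scan for the first '45' inside a trimmed copy (objective: alternative).

-- ===== PORT A =====
def matchMask (s : String) : Bool :=
  if !(PySem.Str.startswith s "123" && PySem.Str.endswith s "67") then false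
  else
    let t := PySem.Str.slice s (some 3) (some (-2))
    if !(PySem.Str.isIn "45" t) then false
    else
      let pos := PySem.Str.find t "45"
      (PySem.Str.slice t none (some pos)).toList.all
        (fun c => PySem.Str.isIn (String.ofList [c]) "02468")
      && (PySem.Str.len (PySem.Str.slice t (some (pos + 2)) none) == 1)

-- ===== PORT B =====
def matchMask_alt (s : String) : Bool :=
  let n := PySem.Str.len s
  decide (8 ≤ n)
  && (PySem.Str.slice s none (some 3) == "123")
  && (PySem.Str.slice s (some ((n : Int) - 5)) (some ((n : Int) - 3)) == "45")
  && (PySem.Str.slice s (some ((n : Int) - 2)) none == "67")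
  && (PySem.Str.slice s (some 3) (some ((n : Int) - 5))).toList.all
      (fun c => PySem.Str.isIn (String.ofList [c]) "02468")

-- ===== PRECONDITION & SPEC =====
def Spec_matchMask (s : String) (out : Bool) : Prop := out = matchMask_alt s
instance (s : String) (out : Bool) : Decidable (Spec_matchMask s out) := by unfold Spec_matchMask; infer_instance

-- ===== CLAIM (what is proved, stated in full; the proofs are below) =====
def Claim_equal_matchMask : Prop := ∀ (s : String), Dom_matchMask s → Spec_matchMask s (matchMask s)

-- ===== LEMMAS AND PROOFS =====

def evDigits : List Char := ['0', '2', '4', '6', '8']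

/-- Common characterisation: `'123' ++ even digits ++ '45' ++ one char ++ '67'`. -/
def MaskShape (cs : List Char) : Prop :=
  ∃ ev c, cs = '1' :: '2' :: '3' :: (ev ++ '4' :: '5' :: c :: '6' :: '7' :: []) ∧
    ∀ e ∈ ev, e ∈ evDigits

theorem evtest (c : Char) :
    (PySem.Str.isIn (String.ofList [c]) "02468" = true) ↔ c ∈ evDigits := by
  rw [PySem.Str.isIn_iff_infix]
  simp [List.singleton_infix_iff, evDigits]

theorem no45 (ev : List Char) (hev : ∀ e ∈ ev, e ∈ evDigits) (c : Char) (j : Nat)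
    (hj : j < ev.length) : ¬ (['4', '5'] <+: (ev ++ ['4', '5', c]).drop j) := by
  rintro ⟨t, ht⟩
  have h5 : (ev ++ ['4', '5', c])[j + 1]? = some '5' := by
    have h1 : ((ev ++ ['4', '5', c]).drop j)[1]? = some '5' := by
      rw [← ht]; rfl
    rw [List.getElem?_drop] at h1
    exact h1
  rcases Nat.lt_or_ge (j + 1) ev.length with hlt | hge
  · rw [List.getElem?_append_left hlt] at h5
    have := hev _ (List.mem_of_getElem? h5)
    simp [evDigits] at this
  · have hj1 : j + 1 = ev.length := by omega
    rw [hj1, List.getElem?_append_right (by omega)] at h5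
    simp at h5

theorem findw (ev : List Char) (c : Char) (hev : ∀ e ∈ ev, e ∈ evDigits) :
    PySem.Chars.find (ev ++ ['4', '5', c]) ['4', '5'] = (ev.length : Int) := by
  have hocc : ['4', '5'] <+: (ev ++ ['4', '5', c]).drop ev.length := by
    rw [List.drop_left' rfl]
    exact ⟨[c], rfl⟩
  have hinf : ['4', '5'] <:+: (ev ++ ['4', '5', c]) := ⟨ev, [c], by simp⟩
  have h0 : 0 ≤ PySem.Chars.find (ev ++ ['4', '5', c]) ['4', '5'] :=
    (PySem.Chars.find_nonneg_iff _ _).mpr hinf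
  obtain ⟨hpre, hmin⟩ := PySem.Chars.find_spec h0
  rcases lt_trichotomy (PySem.Chars.find (ev ++ ['4', '5', c]) ['4', '5']).toNat ev.length
    with hlt | heq | hgt
  · exact absurd hpre (no45 ev hev c _ hlt)
  · omega
  · exact absurd hocc (hmin _ hgt)

theorem slice32 (s : String) (w : List Char)
    (h : s.toList = ['1', '2', '3'] ++ w ++ ['6', '7']) :
    (PySem.Str.slice s (some 3) (some (-2))).toList = w := by
  have hn : 5 ≤ s.toList.length := by rw [h]; simp
  simp only [pysem]
  simp only [PySem.List.slice]
  rw [PySem.List.clampIdx_neg_ofNat _ 2 (by norm_num),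
      PySem.List.clampIdx_of_nonneg_of_le (by norm_num) (by exact_mod_cast hn.trans' (by norm_num))]
  rw [h]
  simp only [List.length_append, List.length_cons, List.length_nil]
  have h3 : (3 : Int).toNat = 3 := rfl
  rw [h3]
  rw [show ['1', '2', '3'] ++ w ++ ['6', '7'] = ['1', '2', '3'] ++ (w ++ ['6', '7']) by simp]
  rw [show (3 : Nat) = (['1', '2', '3'] : List Char).length from rfl, List.drop_left]
  rw [List.take_left' (by simp)]

theorem slice32' (s : String) (w : List Char)
    (h : s.toList = ['1', '2', '3'] ++ w ++ ['6', '7']) :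
    PySem.List.slice s.toList (some 3) (some (-2)) = w := by
  have := slice32 s w h
  simp only [pysem] at this
  exact this

theorem a_iff (s : String) : matchMask s = true ↔ MaskShape s.toList := by
  constructor
  · intro h
    unfold matchMask at h
    cases hsw : PySem.Str.startswith s "123" <;> rw [hsw] at h
    · simp at h
    cases hew : PySem.Str.endswith s "67" <;> rw [hew] at h
    · simp at h
    rw [if_neg (by simp)] at h
    simp only [Bool.not_eq_true'] at h
    cases hin : PySem.Str.isIn "45" (PySem.Str.slice s (some 3) (some (-2))) <;> rw [hin] at h
    · simp at h
    rw [if_neg (by simp)] at h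
    rw [PySem.Str.startswith_eq] at hsw
    rw [PySem.Str.endswith_eq] at hew
    obtain ⟨u, hu⟩ := (PySem.Chars.startswith_iff _ _).mp hsw
    obtain ⟨v, hv⟩ := (PySem.Chars.endswith_iff _ _).mp hew
    rw [show ("123" : String).toList = ['1', '2', '3'] from rfl] at hu
    rw [show ("67" : String).toList = ['6', '7'] from rfl] at hv
    have heq : v ++ ['6', '7'] = ['1', '2', '3'] ++ u := by rw [hu, hv]
    rcases v with _ | ⟨a, _ | ⟨b, _ | ⟨d, w⟩⟩⟩
    · simp at heq
    · simp at heq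
    · simp at heq
    · simp only [List.cons_append, List.nil_append, List.cons.injEq] at heq
      obtain ⟨ha, hb, hd, hw⟩ := heq
      subst ha hb hd
      have hcs : s.toList = ['1', '2', '3'] ++ w ++ ['6', '7'] := by
        rw [← hu, ← hw]; simp
      have hT := slice32 s w hcs
      have hT' := slice32' s w hcs
      rw [PySem.Str.isIn_iff_infix, hT] at hin
      rw [show ("45" : String).toList = ['4', '5'] from rfl] at hin
      have hfind0 : 0 ≤ PySem.Chars.find w ['4', '5'] :=
        (PySem.Chars.find_nonneg_iff _ _).mpr hin
      have hfeq : PySem.Str.find (PySem.Str.slice s (some 3) (some (-2))) "45"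
          = PySem.Chars.find w ['4', '5'] := by
        rw [PySem.Str.find_eq, hT]; rfl
      rw [hfeq] at h
      simp only [Bool.and_eq_true, List.all_eq_true, beq_iff_eq] at h
      obtain ⟨hall, hlen1⟩ := h
      rw [PySem.Str.len_eq] at hlen1
      have e2 : (PySem.Str.slice (PySem.Str.slice s (some 3) (some (-2)))
          (some (PySem.Chars.find w ['4', '5'] + 2)) none).toList
          = w.drop ((PySem.Chars.find w ['4', '5']).toNat + 2) := by
        simp only [pysem]
        rw [PySem.List.slice_from _ (by omega), hT']
        congr 1
        omega
      rw [e2, List.length_drop] at hlen1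
      obtain ⟨r, hr⟩ := (PySem.Chars.find_spec hfind0).1
      have hlw := congrArg List.length hr
      simp only [List.length_append, List.length_cons, List.length_nil, List.length_drop] at hlw
      have hrlen : r.length = 1 := by omega
      obtain ⟨c, hc⟩ := List.length_eq_one_iff.mp hrlen
      subst hc
      have e1 : (PySem.Str.slice (PySem.Str.slice s (some 3) (some (-2)))
          none (some (PySem.Chars.find w ['4', '5']))).toList
          = w.take (PySem.Chars.find w ['4', '5']).toNat := by
        simp only [pysem]
        rw [PySem.List.slice_to _ hfind0, hT']
      rw [e1] at hall
      refine ⟨w.take (PySem.Chars.find w ['4', '5']).toNat, c, ?_, ?_⟩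
      · rw [hcs]
        have hwsplit : w = w.take (PySem.Chars.find w ['4', '5']).toNat ++ (['4', '5'] ++ [c]) := by
          conv_lhs => rw [← List.take_append_drop (PySem.Chars.find w ['4', '5']).toNat w]
          rw [← hr]
        conv_lhs => rw [hwsplit]
        simp
      · intro e he
        exact (evtest e).mp (hall e he)
  · rintro ⟨ev, c, hsh, hev⟩
    have hcs : s.toList = ['1', '2', '3'] ++ (ev ++ ['4', '5', c]) ++ ['6', '7'] := by
      rw [hsh]; simp
    have hT := slice32 s (ev ++ ['4', '5', c]) hcs
    have hT' := slice32' s (ev ++ ['4', '5', c]) hcs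
    have hsw : PySem.Str.startswith s "123" = true := by
      rw [PySem.Str.startswith_eq, PySem.Chars.startswith_iff]
      exact ⟨(ev ++ ['4', '5', c]) ++ ['6', '7'], by rw [hcs]; simp⟩
    have hew : PySem.Str.endswith s "67" = true := by
      rw [PySem.Str.endswith_eq, PySem.Chars.endswith_iff]
      exact ⟨['1', '2', '3'] ++ (ev ++ ['4', '5', c]), by rw [hcs]; simp⟩
    have hin' : PySem.Chars.isIn ['4', '5'] (PySem.List.slice s.toList (some 3) (some (-2)))
        = true := by
      rw [hT', PySem.Chars.isIn_iff_infix]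
      exact ⟨ev, [c], by simp⟩
    unfold matchMask
    rw [hsw, hew, if_neg (by simp)]
    simp only [Bool.not_eq_true']
    rw [if_neg (by simp [hin'])]
    have hfeq : PySem.Str.find (PySem.Str.slice s (some 3) (some (-2))) "45"
        = (ev.length : Int) := by
      rw [PySem.Str.find_eq, hT]
      rw [show ("45" : String).toList = ['4', '5'] from rfl]
      exact findw ev c hev
    rw [hfeq]
    simp only [Bool.and_eq_true, List.all_eq_true, beq_iff_eq]
    constructor
    · intro e he
      have e1 : (PySem.Str.slice (PySem.Str.slice s (some 3) (some (-2)))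
          none (some (ev.length : Int))).toList = ev := by
        simp only [pysem]
        rw [hT', List.take_left' rfl]
      rw [e1] at he
      exact (evtest e).mpr (hev e he)
    · have e2 : (PySem.Str.slice (PySem.Str.slice s (some 3) (some (-2)))
          (some ((ev.length : Int) + 2)) none).toList = [c] := by
        simp only [pysem]
        rw [PySem.List.slice_from _ (by omega), hT']
        rw [show ((ev.length : Int) + 2).toNat = ev.length + 2 by omega]
        rw [show ev ++ ['4', '5', c] = (ev ++ ['4', '5']) ++ [c] by simp]
        rw [List.drop_left' (by simp)]
      rw [PySem.Str.len_eq, e2]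
      rfl

theorem alt_iff (s : String) : matchMask_alt s = true ↔ MaskShape s.toList := by
  unfold matchMask_alt
  simp only [Bool.and_eq_true, decide_eq_true_eq, beq_iff_eq, List.all_eq_true,
    PySem.Str.len_eq]
  constructor
  · rintro ⟨⟨⟨⟨h8, h123⟩, h45⟩, h67⟩, hall⟩
    have t123 : s.toList.take 3 = ['1', '2', '3'] := by
      have h := congrArg String.toList h123
      simp only [pysem] at h
      rw [PySem.List.slice_to _ (by norm_num)] at h
      rw [show ((3 : Int)).toNat = 3 from rfl] at h
      rw [h]; rfl
    have t45 : (s.toList.drop (s.toList.length - 5)).take 2 = ['4', '5'] := by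
      have h := congrArg String.toList h45
      simp only [pysem] at h
      rw [PySem.List.slice_toNat _ (by omega) (by omega)] at h
      rw [show ((s.toList.length : Int) - 5).toNat = s.toList.length - 5 by omega,
          show ((s.toList.length : Int) - 3).toNat = s.toList.length - 3 by omega,
          show s.toList.length - 3 - (s.toList.length - 5) = 2 by omega] at h
      rw [h]; rfl
    have t67 : s.toList.drop (s.toList.length - 2) = ['6', '7'] := by
      have h := congrArg String.toList h67
      simp only [pysem] at h
      rw [PySem.List.slice_from _ (by omega)] at h
      rw [show ((s.toList.length : Int) - 2).toNat = s.toList.length - 2 by omega] at h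
      rw [h]; rfl
    have tconv : (PySem.Str.slice s (some 3) (some ((s.toList.length : Int) - 5))).toList
        = (s.toList.drop 3).take (s.toList.length - 8) := by
      simp only [pysem]
      rw [PySem.List.slice_toNat _ (by norm_num) (by omega)]
      rw [show ((3 : Int)).toNat = 3 from rfl,
          show ((s.toList.length : Int) - 5).toNat - 3 = s.toList.length - 8 by omega]
    rw [tconv] at hall
    obtain ⟨c, hc⟩ : ∃ c, (s.toList.drop (s.toList.length - 3)).take 1 = [c] := by
      apply List.length_eq_one_iff.mp
      simp only [List.length_take, List.length_drop]
      omega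
    refine ⟨(s.toList.drop 3).take (s.toList.length - 8), c, ?_, ?_⟩
    · conv_lhs => rw [← List.take_append_drop 3 s.toList]
      rw [t123]
      conv_lhs => rw [← List.take_append_drop (s.toList.length - 8) (s.toList.drop 3)]
      have dd : (s.toList.drop 3).drop (s.toList.length - 8)
          = s.toList.drop (s.toList.length - 5) := by
        rw [List.drop_drop]; congr 1; omega
      rw [dd]
      conv_lhs => rw [← List.take_append_drop 2 (s.toList.drop (s.toList.length - 5))]
      rw [t45]
      have dd2 : (s.toList.drop (s.toList.length - 5)).drop 2
          = s.toList.drop (s.toList.length - 3) := by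
        rw [List.drop_drop]; congr 1; omega
      rw [dd2]
      conv_lhs => rw [← List.take_append_drop 1 (s.toList.drop (s.toList.length - 3))]
      rw [hc]
      have dd3 : (s.toList.drop (s.toList.length - 3)).drop 1
          = s.toList.drop (s.toList.length - 2) := by
        rw [List.drop_drop]; congr 1; omega
      rw [dd3, t67]
      simp
    · intro e he
      exact (evtest e).mp (hall e he)
  · rintro ⟨ev, c, hsh, hev⟩
    have hn : s.toList.length = ev.length + 8 := by
      rw [hsh]
      simp only [List.length_cons, List.length_append, List.length_nil]
    have hsh' : s.toList = (['1', '2', '3'] ++ ev) ++ '4' :: '5' :: c :: '6' :: '7' :: [] := by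
      rw [hsh]; simp
    refine ⟨⟨⟨⟨by omega, ?_⟩, ?_⟩, ?_⟩, ?_⟩
    · apply String.toList_inj.mp
      simp only [pysem]
      rw [PySem.List.slice_to _ (by norm_num), hsh]
      rfl
    · apply String.toList_inj.mp
      simp only [pysem]
      rw [PySem.List.slice_toNat _ (by omega) (by omega)]
      rw [show ((s.toList.length : Int) - 5).toNat = ev.length + 3 by omega,
          show ((s.toList.length : Int) - 3).toNat = ev.length + 5 by omega,
          show ev.length + 5 - (ev.length + 3) = 2 by omega]
      rw [hsh', List.drop_left'
        (by simp only [List.length_append, List.length_cons, List.length_nil]; omega)]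
      rfl
    · apply String.toList_inj.mp
      simp only [pysem]
      rw [PySem.List.slice_from _ (by omega)]
      rw [show ((s.toList.length : Int) - 2).toNat = ev.length + 6 by omega]
      rw [show s.toList = (['1', '2', '3'] ++ ev ++ ['4', '5', c]) ++ ['6', '7'] by rw [hsh]; simp]
      rw [List.drop_left'
        (by simp only [List.length_append, List.length_cons, List.length_nil]; omega)]
      rfl
    · intro e he
      have tconv : (PySem.Str.slice s (some 3) (some ((s.toList.length : Int) - 5))).toList
          = ev := by
        simp only [pysem]
        rw [PySem.List.slice_toNat _ (by norm_num) (by omega)]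
        rw [show ((3 : Int)).toNat = 3 from rfl,
            show ((s.toList.length : Int) - 5).toNat - 3 = ev.length by omega]
        rw [hsh]
        simp only [List.drop_succ_cons, List.drop_zero]
        rw [List.take_left' rfl]
      rw [tconv] at he
      exact (evtest e).mpr (hev e he)

-- ===== VERDICT (by name: the statement is the Claim_ definition above) =====
theorem matchMask_spec : Claim_equal_matchMask := by
  intro s _
  unfold Spec_matchMask
  have hA := a_iff s
  have hB := alt_iff s
  cases h1 : matchMask s <;> cases h2 : matchMask_alt s <;> simp_all
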